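-- pv_equiv track=rewrite | github.com/gregf-ai/Michelin-GregF | tire-brand-analyzer/data/parse_manual_transcripts.py | find_content_start
-- ===== SOURCE A (Python) =====
-- def find_content_start(lines):
--     """Find the index where actual transcript content begins (after participant lists)."""
--     last_participant_line = -1
--     for i, line in enumerate(lines):
--         if " - " in line.strip() and line.strip():
--             last_participant_line = i
--
--     if last_participant_line == -1:
--         return 0
--
--     # Skip blank lines after participant list to find first speaker line
--     i = last_participant_line + 1
--     while i < len(lines) and lines[i].strip() == "":
--         i += 1
--     return i
-- ===== SOURCE B (Python) =====
-- def find_content_start(lines):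
--     """Find the index where actual transcript content begins (after participant lists)."""
--     # Single forward pass with a state machine: on each participant line ("' - '" in
--     # stripped form) restart the pending search; on the first subsequent non-blank
--     # line record its index. No staged passes, no index re-scanning.
--     seen = False
--     ans = None
--     for i, line in enumerate(lines):
--         s = line.strip()
--         if " - " in s:
--             seen = True
--             ans = None
--         elif ans is None and s:
--             ans = i
--     if not seen:
--         return 0
--     return ans if ans is not None else len(lines)
-- ===== Notes on version B (the rewrite author's own statement) =====
-- stated objective: alternative
-- what changed: A's two staged passes (a full pass to find the last participant line, then a second index-based while-loop skipping blanks after it) are replaced by one forward pass with a two-field state machine that resets the pending answer at every participant line and records the first subsequent non-blank index, so no index is ever revisited.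
import Mathlib
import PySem

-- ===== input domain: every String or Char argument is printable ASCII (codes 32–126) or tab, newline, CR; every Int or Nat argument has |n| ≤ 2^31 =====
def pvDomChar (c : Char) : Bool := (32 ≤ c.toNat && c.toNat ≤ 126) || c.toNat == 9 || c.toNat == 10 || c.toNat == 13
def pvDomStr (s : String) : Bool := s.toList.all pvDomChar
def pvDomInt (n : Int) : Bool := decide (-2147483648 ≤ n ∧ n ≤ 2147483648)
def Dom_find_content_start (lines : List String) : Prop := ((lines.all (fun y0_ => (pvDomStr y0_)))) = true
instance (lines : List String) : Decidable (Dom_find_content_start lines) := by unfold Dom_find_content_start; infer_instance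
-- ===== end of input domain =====

-- B replaces A's two staged passes (last-participant scan, then blank-skipping while-loop)
-- by one forward pass with a state machine (alternative decomposition, same cost).

-- ===== PORT A =====
-- while i < len(lines) and lines[i].strip() == "": i += 1; return i
-- (pyGetD: the loop guard keeps the index in range, so the default is never used)
def pvSkipA (lines : List String) (i : Int) : Int :=
  if h : i < (lines.length : Int) ∧ PySem.Str.strip (PySem.List.pyGetD lines i "") = "" then
    pvSkipA lines (i + 1)
  else i
termination_by ((lines.length : Int) - i).toNat
decreasing_by omega

def find_content_start (lines : List String) : Int :=
  let last_participant_line : Int :=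
    (PySem.List.enumerate lines 0).foldl
      (fun acc p =>
        if PySem.Str.isIn " - " (PySem.Str.strip p.2) && !(PySem.Str.strip p.2 == "") then p.1
        else acc)
      (-1)
  if last_participant_line = -1 then 0
  else pvSkipA lines (last_participant_line + 1)

-- ===== PORT B =====
-- single pass: seen=False, ans=None; participant line resets ans, first non-blank after sets it
def pvStepB (st : Bool × Option Int) (p : Int × String) : Bool × Option Int :=
  let s := PySem.Str.strip p.2
  if PySem.Str.isIn " - " s then (true, none)
  else if st.2 = none ∧ s ≠ "" then (st.1, some p.1)
  else st

def find_content_start_alt (lines : List String) : Int :=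
  let st := (PySem.List.enumerate lines 0).foldl pvStepB (false, none)
  if st.1 = false then 0
  else st.2.getD (lines.length : Int)

-- ===== PRECONDITION & SPEC =====
def Spec_find_content_start (lines : List String) (out : Int) : Prop := out = find_content_start_alt lines
instance (lines : List String) (out : Int) : Decidable (Spec_find_content_start lines out) := by unfold Spec_find_content_start; infer_instance

-- ===== CLAIM (what is proved, stated in full; the proofs are below) =====
def Claim_equal_find_content_start : Prop := ∀ (lines : List String), Dom_find_content_start lines → Spec_find_content_start lines (find_content_start lines)

-- ===== LEMMAS AND PROOFS =====

-- a stripped line containing " - " is non-empty, so A's second conjunct is redundant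
theorem pv_isIn_ne_empty (s : String) :
    (PySem.Str.isIn " - " s && !(s == "")) = PySem.Str.isIn " - " s := by
  by_cases hs : s = ""
  · subst hs; decide
  · simp [hs]

theorem pv_enumerate_append_singleton (xs : List String) (x : String) (s : Int) :
    PySem.List.enumerate (xs ++ [x]) s
      = PySem.List.enumerate xs s ++ [(s + (xs.length : Int), x)] := by
  induction xs generalizing s with
  | nil => simp [PySem.List.enumerate_nil, PySem.List.enumerate_cons]
  | cons y ys ih =>
    simp [PySem.List.enumerate_cons, ih]
    ring_nf

theorem pv_pyGetD_append (xs : List String) (x : String) (i : Int)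
    (h0 : 0 ≤ i) (h1 : i < (xs.length : Int)) :
    PySem.List.pyGetD (xs ++ [x]) i "" = PySem.List.pyGetD xs i "" := by
  rw [PySem.List.pyGetD_eq_getElem _ _ h0 (by simp; omega),
      PySem.List.pyGetD_eq_getElem _ _ h0 h1]
  rw [List.getElem_append_left (by omega)]

-- behaviour of the blank-skipping loop under appending one line at the end
theorem pv_skipA_append (xs : List String) (x : String) (i : Int)
    (h0 : 0 ≤ i) (h1 : i ≤ (xs.length : Int)) :
    pvSkipA (xs ++ [x]) i =
      if pvSkipA xs i = (xs.length : Int) then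
        (if PySem.Str.strip x = "" then (xs.length : Int) + 1 else (xs.length : Int))
      else pvSkipA xs i := by
  have H : ∀ (k : Nat) (i : Int), 0 ≤ i → i ≤ (xs.length : Int) →
      ((xs.length : Int) - i).toNat = k →
      pvSkipA (xs ++ [x]) i =
        if pvSkipA xs i = (xs.length : Int) then
          (if PySem.Str.strip x = "" then (xs.length : Int) + 1 else (xs.length : Int))
        else pvSkipA xs i := by
    intro k
    induction k with
    | zero =>
      intro i h0 h1 hk
      have hi : i = (xs.length : Int) := by omega
      subst hi
      have hxs : pvSkipA xs (xs.length : Int) = (xs.length : Int) := by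
        rw [pvSkipA, dif_neg (by rintro ⟨h, -⟩; omega)]
      rw [hxs, if_pos rfl]
      have hget : PySem.List.pyGetD (xs ++ [x]) (xs.length : Int) "" = x := by
        rw [PySem.List.pyGetD_eq_getElem _ _ (by omega) (by simp)]; simp
      by_cases hb : PySem.Str.strip x = ""
      · rw [pvSkipA, dif_pos ⟨by simp, by rw [hget]; exact hb⟩]
        rw [pvSkipA, dif_neg (by rintro ⟨h, -⟩; simp at h)]
        simp [hb]
      · rw [pvSkipA, dif_neg (by rintro ⟨-, h⟩; rw [hget] at h; exact hb h)]
        simp [hb]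
    | succ k ih =>
      intro i h0 h1 hk
      have hlt : i < (xs.length : Int) := by omega
      have hget := pv_pyGetD_append xs x i h0 hlt
      by_cases hb : PySem.Str.strip (PySem.List.pyGetD xs i "") = ""
      · rw [pvSkipA, dif_pos ⟨by simp; omega, by rw [hget]; exact hb⟩]
        conv_rhs => rw [pvSkipA, dif_pos ⟨hlt, hb⟩]
        exact ih (i + 1) (by omega) (by omega) (by omega)
      · rw [pvSkipA, dif_neg (by rintro ⟨-, h⟩; rw [hget] at h; exact hb h)]
        conv_rhs => rw [pvSkipA, dif_neg (by rintro ⟨-, h⟩; exact hb h)]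
        rw [if_neg (by omega)]
  exact H (((xs.length : Int) - i).toNat) i h0 h1 rfl

-- abbreviations for the two accumulators (proof-local)
def pvLastA (lines : List String) : Int :=
  (PySem.List.enumerate lines 0).foldl
    (fun acc p =>
      if PySem.Str.isIn " - " (PySem.Str.strip p.2) && !(PySem.Str.strip p.2 == "") then p.1
      else acc) (-1)

def pvStB (lines : List String) : Bool × Option Int :=
  (PySem.List.enumerate lines 0).foldl pvStepB (false, none)

-- the joint invariant of the two computations
theorem pv_inv (lines : List String) :
    ((pvStB lines).1 = true ↔ pvLastA lines ≠ -1) ∧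
    (pvLastA lines ≠ -1 →
      0 ≤ pvLastA lines ∧ pvLastA lines < (lines.length : Int) ∧
      (match (pvStB lines).2 with
       | some j => j < (lines.length : Int) ∧ pvSkipA lines (pvLastA lines + 1) = j
       | none => pvSkipA lines (pvLastA lines + 1) = (lines.length : Int))) := by
  induction lines using List.reverseRecOn with
  | nil =>
    constructor
    · simp [pvStB, pvLastA, PySem.List.enumerate_nil]
    · simp [pvLastA, PySem.List.enumerate_nil]
  | append_singleton xs x ih =>
    have hLeq : pvLastA (xs ++ [x]) =
        (if PySem.Str.isIn " - " (PySem.Str.strip x) then (xs.length : Int) else pvLastA xs) := by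
      unfold pvLastA
      rw [pv_enumerate_append_singleton, List.foldl_append]
      simp only [List.foldl_cons, List.foldl_nil, pv_isIn_ne_empty]
      split <;> simp_all
    have hSeq : pvStB (xs ++ [x]) = pvStepB (pvStB xs) ((xs.length : Int), x) := by
      unfold pvStB
      rw [pv_enumerate_append_singleton, List.foldl_append]
      simp
    by_cases hm : PySem.Str.isIn " - " (PySem.Str.strip x) = true
    · -- participant line appended: state resets, last = |xs|
      have hL : pvLastA (xs ++ [x]) = (xs.length : Int) := by rw [hLeq, if_pos hm]
      have hS : pvStB (xs ++ [x]) = (true, none) := by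
        rw [hSeq]; simp only [pvStepB, hm, if_true]
      refine ⟨by rw [hS, hL]; simp, ?_⟩
      intro _
      rw [hS, hL]
      refine ⟨by omega, by simp, ?_⟩
      simp only
      rw [pvSkipA, dif_neg (by simp)]
      simp
    · have hmB : PySem.Str.isIn " - " (PySem.Str.strip x) = false := by
        simpa using hm
      have hL : pvLastA (xs ++ [x]) = pvLastA xs := by rw [hLeq, if_neg hm]
      rw [hL, hSeq]
      simp only [pvStepB, hmB, Bool.false_eq_true, if_false]
      by_cases hLm1 : pvLastA xs = -1
      · -- no participant line yet: seen stays false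
        have hseen : (pvStB xs).1 = false := by
          rcases ih with ⟨ih1, _⟩
          cases h : (pvStB xs).1
          · rfl
          · exact absurd (ih1.mp h) (by simp [hLm1])
        constructor
        · split <;> simp [hseen, hLm1]
        · intro h; exact absurd hLm1 h
      · rcases ih with ⟨ih1, ih2⟩
        rcases ih2 hLm1 with ⟨hb0, hb1, hmatch⟩
        have hskip := pv_skipA_append xs x (pvLastA xs + 1) (by omega) (by omega)
        constructor
        · split <;> simp [ih1, hLm1]
        · intro _
          refine ⟨hb0, by simp; omega, ?_⟩
          cases hans : (pvStB xs).2 with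
          | some j =>
            rw [hans] at hmatch
            rw [if_neg (by simp)]
            simp only [hans]
            rw [hskip, if_neg (by omega)]
            exact ⟨by simp; omega, hmatch.2⟩
          | none =>
            rw [hans] at hmatch
            by_cases hb : PySem.Str.strip x = ""
            · rw [if_neg (by simp [hb])]
              simp only [hans]
              rw [hskip, if_pos hmatch, if_pos hb]
              simp
            · rw [if_pos (by simp [hb])]
              simp only
              rw [hskip, if_pos hmatch, if_neg hb]
              exact ⟨by simp, rfl⟩

-- ===== VERDICT (by name: the statement is the Claim_ definition above) =====
theorem find_content_start_spec : Claim_equal_find_content_start := by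
  intro lines _
  unfold Spec_find_content_start find_content_start find_content_start_alt
  rcases pv_inv lines with ⟨h1, h2⟩
  show (if pvLastA lines = -1 then 0 else pvSkipA lines (pvLastA lines + 1))
      = (if (pvStB lines).1 = false then 0 else (pvStB lines).2.getD (lines.length : Int))
  by_cases hL : pvLastA lines = -1
  · have : (pvStB lines).1 = false := by
      cases h : (pvStB lines).1
      · rfl
      · exact absurd (h1.mp h) (by simp [hL])
    rw [if_pos hL, if_pos this]
  · have hseen : (pvStB lines).1 = true := h1.mpr hL
    rw [if_neg hL, if_neg (by simp [hseen])]
    rcases h2 hL with ⟨_, _, hmatch⟩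
    cases hans : (pvStB lines).2 with
    | some j => rw [hans] at hmatch; simp [hmatch.2]
    | none => rw [hans] at hmatch; simp [hmatch]
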